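-- pv_equiv track=rewrite | github.com/CA-Gray90/PY101-Programming-Foundations | revision/coding_exercises/balanced_substrings.py | balanced_substrings
-- ===== SOURCE A (Python) =====
-- def balanced_substrings(string):
--     substring_list = []
--
--     for idx, char in enumerate(string):
--         for k, v in {'(' : ')', '[' : ']', '{' : '}'}.items():
--             if char == k:
--                 substring_list.append(string[idx:string.find(v, idx) + 1])
--
--     substring_list.sort(key=len)
--
--     return substring_list
-- ===== SOURCE B (Python) =====
-- def balanced_substrings(string):
--     next_round = next_square = next_brace = None
--     out = []
--     for idx, ch in reversed(list(enumerate(string))):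
--         if ch == ')':
--             next_round = idx
--         elif ch == ']':
--             next_square = idx
--         elif ch == '}':
--             next_brace = idx
--         elif ch == '(':
--             out.append('' if next_round is None else string[idx:next_round + 1])
--         elif ch == '[':
--             out.append('' if next_square is None else string[idx:next_square + 1])
--         elif ch == '{':
--             out.append('' if next_brace is None else string[idx:next_brace + 1])
--     out.reverse()
--     out.sort(key=len)
--     return out
-- ===== Notes on version B (the rewrite author's own statement) =====
-- stated objective: alternative
-- what changed: Replaces the per-opener string.find scan with a single right-to-left pass that maintains the next index of each closing bracket in three variables, emitting each substring from a recorded index instead of a repeated search.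
import Mathlib
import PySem

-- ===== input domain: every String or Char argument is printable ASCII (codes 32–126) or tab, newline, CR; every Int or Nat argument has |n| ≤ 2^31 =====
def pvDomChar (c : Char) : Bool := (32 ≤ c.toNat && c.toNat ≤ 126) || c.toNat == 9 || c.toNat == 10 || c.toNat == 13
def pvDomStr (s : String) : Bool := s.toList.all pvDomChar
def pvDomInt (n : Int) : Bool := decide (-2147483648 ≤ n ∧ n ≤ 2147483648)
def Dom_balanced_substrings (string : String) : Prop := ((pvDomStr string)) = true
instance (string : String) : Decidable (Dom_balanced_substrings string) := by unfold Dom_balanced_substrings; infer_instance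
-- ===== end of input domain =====

-- B replaces A's per-opener string.find scan by one right-to-left pass that records the next index
-- of each closing bracket; same return value, an alternative (differently shaped) algorithm.

-- ===== PORT A =====
def balanced_substrings (string : String) : List String :=
  let substring_list : List String :=
    (PySem.List.enumerate string.toList).foldl (fun substring_list ic =>
      ((PySem.Dict.ofList [('(', ')'), ('[', ']'), ('{', '}')]).items).foldl (fun acc kv =>
        if ic.2 == kv.1 then
          acc ++ [PySem.Str.slice string (some ic.1)
                    (some (PySem.Str.findFrom string (String.ofList [kv.2]) ic.1 none + 1))]
        else acc) substring_list) []
  PySem.List.sorted substring_list (fun s => PySem.Str.len s) false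

-- ===== PORT B =====
-- one loop body of Source B's backward pass: state = (next_round, next_square, next_brace, out)
def bsStep (string : String) (st : Option Int × Option Int × Option Int × List String)
    (ic : Int × Char) : Option Int × Option Int × Option Int × List String :=
  match st with
  | (nr, ns, nb, out) =>
    if ic.2 == ')' then (some ic.1, ns, nb, out)
    else if ic.2 == ']' then (nr, some ic.1, nb, out)
    else if ic.2 == '}' then (nr, ns, some ic.1, out)
    else if ic.2 == '(' then
      (nr, ns, nb, out ++ [match nr with
        | none => ""
        | some j => PySem.Str.slice string (some ic.1) (some (j + 1))])
    else if ic.2 == '[' then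
      (nr, ns, nb, out ++ [match ns with
        | none => ""
        | some j => PySem.Str.slice string (some ic.1) (some (j + 1))])
    else if ic.2 == '{' then
      (nr, ns, nb, out ++ [match nb with
        | none => ""
        | some j => PySem.Str.slice string (some ic.1) (some (j + 1))])
    else (nr, ns, nb, out)

def balanced_substrings_alt (string : String) : List String :=
  let st := ((PySem.List.enumerate string.toList).reverse).foldl (bsStep string) (none, none, none, [])
  PySem.List.sorted st.2.2.2.reverse (fun s => PySem.Str.len s) false

-- ===== PRECONDITION & SPEC =====
def Spec_balanced_substrings (string : String) (out : List String) : Prop := out = balanced_substrings_alt string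
instance (string : String) (out : List String) : Decidable (Spec_balanced_substrings string out) := by unfold Spec_balanced_substrings; infer_instance

-- ===== CLAIM (what is proved, stated in full; the proofs are below) =====
def Claim_equal_balanced_substrings : Prop := ∀ (string : String), Dom_balanced_substrings string → Spec_balanced_substrings string (balanced_substrings string)

-- ===== LEMMAS AND PROOFS =====

-- what A appends for the character c at index i
def sliceA (string : String) (i : Int) (v : Char) : String :=
  PySem.Str.slice string (some i) (some (PySem.Str.findFrom string (String.ofList [v]) i none + 1))

def emitA (string : String) (i : Int) (c : Char) : List String :=
  if c == '(' then [sliceA string i ')']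
  else if c == '[' then [sliceA string i ']']
  else if c == '{' then [sliceA string i '}']
  else []

-- first recorded index of v in an enumerated suffix
def fo (v : Char) (l : List (Int × Char)) : Option Int :=
  (l.find? (fun p => p.2 == v)).map (·.1)

def emitOne (string : String) (i : Int) (o : Option Int) : List String :=
  match o with
  | none => [""]
  | some j => [PySem.Str.slice string (some i) (some (j + 1))]

-- what B appends, read off the enumerated list
def emit (string : String) : List (Int × Char) → List String
  | [] => []
  | (i, c) :: rest =>
      (if c == '(' then emitOne string i (fo ')' rest)
       else if c == '[' then emitOne string i (fo ']' rest)
       else if c == '{' then emitOne string i (fo '}' rest)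
       else []) ++ emit string rest

lemma fo_cons (v : Char) (i : Int) (c : Char) (rest : List (Int × Char)) :
    fo v ((i, c) :: rest) = if c == v then some i else fo v rest := by
  simp only [fo, List.find?_cons]
  by_cases h : c == v <;> simp [h]

lemma A_inner (string : String) (acc : List String) (ic : Int × Char) :
    ((PySem.Dict.ofList [('(', ')'), ('[', ']'), ('{', '}')]).items).foldl (fun acc kv =>
        if ic.2 == kv.1 then
          acc ++ [PySem.Str.slice string (some ic.1)
                    (some (PySem.Str.findFrom string (String.ofList [kv.2]) ic.1 none + 1))]
        else acc) acc = acc ++ emitA string ic.1 ic.2 := by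
  have hitems : (PySem.Dict.ofList [('(', ')'), ('[', ']'), ('{', '}')]).items
      = [('(',')'),('[',']'),('{','}')] := by decide
  obtain ⟨i, c⟩ := ic
  rw [hitems]
  simp only [List.foldl]
  by_cases h1 : c = '('
  · subst h1; simp [emitA, sliceA]
  by_cases h2 : c = '['
  · subst h2; simp [emitA, sliceA]
  by_cases h3 : c = '{'
  · subst h3; simp [emitA, sliceA]
  · simp [emitA, beq_iff_eq, h1, h2, h3]

lemma A_list (string : String) :
    (PySem.List.enumerate string.toList).foldl (fun substring_list ic =>
      ((PySem.Dict.ofList [('(', ')'), ('[', ']'), ('{', '}')]).items).foldl (fun acc kv =>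
        if ic.2 == kv.1 then
          acc ++ [PySem.Str.slice string (some ic.1)
                    (some (PySem.Str.findFrom string (String.ofList [kv.2]) ic.1 none + 1))]
        else acc) substring_list) []
    = (PySem.List.enumerate string.toList).flatMap (fun ic => emitA string ic.1 ic.2) := by
  have aux : ∀ (l : List (Int × Char)) (acc : List String),
      l.foldl (fun substring_list ic =>
        ((PySem.Dict.ofList [('(', ')'), ('[', ']'), ('{', '}')]).items).foldl (fun acc kv =>
          if ic.2 == kv.1 then
            acc ++ [PySem.Str.slice string (some ic.1)
                      (some (PySem.Str.findFrom string (String.ofList [kv.2]) ic.1 none + 1))]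
          else acc) substring_list) acc
      = acc ++ l.flatMap (fun ic => emitA string ic.1 ic.2) := by
    intro l
    induction l with
    | nil => simp
    | cons x rest ih =>
      intro acc
      simp only [List.foldl, List.flatMap_cons]
      rw [A_inner, ih, List.append_assoc]
  simpa using aux (PySem.List.enumerate string.toList) []

lemma B_fold (string : String) (l : List (Int × Char)) :
    List.foldr (fun x st => bsStep string st x) (none, none, none, []) l
      = (fo ')' l, fo ']' l, fo '}' l, (emit string l).reverse) := by
  induction l with
  | nil => simp [fo, emit]
  | cons x rest ih =>
    obtain ⟨i, c⟩ := x
    simp only [List.foldr, ih]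
    by_cases h1 : c = ')'
    · subst h1; simp [bsStep, fo_cons, emit]
    by_cases h2 : c = ']'
    · subst h2; simp [bsStep, fo_cons, emit]
    by_cases h3 : c = '}'
    · subst h3; simp [bsStep, fo_cons, emit]
    by_cases h4 : c = '('
    · subst h4; cases ho : fo ')' rest <;> simp [bsStep, fo_cons, emit, emitOne, ho]
    by_cases h5 : c = '['
    · subst h5; cases ho : fo ']' rest <;> simp [bsStep, fo_cons, emit, emitOne, ho]
    by_cases h6 : c = '{'
    · subst h6; cases ho : fo '}' rest <;> simp [bsStep, fo_cons, emit, emitOne, ho]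
    · simp [bsStep, fo_cons, emit, beq_iff_eq, h1, h2, h3, h4, h5, h6]

lemma F1 (v : Char) (l : List Char) (m : Int) :
    fo v (PySem.List.enumerate l m)
      = (l.findIdx? (· == v)).map (fun t => m + (t : Int)) := by
  induction l generalizing m with
  | nil => simp [fo, PySem.List.enumerate_nil]
  | cons c rest ih =>
    rw [PySem.List.enumerate_cons, fo_cons, List.findIdx?_cons]
    by_cases h : c == v
    · simp [h]
    · rw [ih (m + 1)]
      cases hx : rest.findIdx? (· == v) with
      | none => simp [h]
      | some t => simp [h]; ring

lemma singleton_infix_iff_mem (v : Char) (l : List Char) : [v] <:+: l ↔ v ∈ l := by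
  constructor
  · intro h
    exact List.singleton_sublist.mp h.sublist
  · intro h
    obtain ⟨s, t, rfl⟩ := List.append_of_mem h
    exact ⟨s, t, by simp⟩

lemma singleton_prefix_drop_iff (v : Char) (l : List Char) (j : Nat) :
    [v] <+: l.drop j ↔ l[j]? = some v := by
  rw [← List.head?_drop]
  constructor
  · rintro ⟨t, ht⟩
    rw [← ht]; rfl
  · intro h
    cases hd : l.drop j with
    | nil => rw [hd] at h; simp at h
    | cons a t =>
      rw [hd] at h; simp at h
      exact ⟨t, by simp [h]⟩

lemma F2 (v : Char) (l : List Char) :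
    PySem.Chars.find l [v]
      = (match l.findIdx? (· == v) with | none => -1 | some t => (t : Int)) := by
  cases hx : l.findIdx? (· == v) with
  | none =>
    have hm : v ∉ l := by
      intro hv
      have := List.findIdx?_eq_none_iff.mp hx v hv
      simp at this
    exact (PySem.Chars.find_eq_neg_one_iff l [v]).mpr
      (fun hinf => hm ((singleton_infix_iff_mem v l).mp hinf))
  | some t =>
    obtain ⟨ht, hpt, hmin⟩ := List.findIdx?_eq_some_iff_getElem.mp hx
    have htv : l[t] = v := by simpa using hpt
    have hmem : v ∈ l := htv ▸ l.getElem_mem ht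
    have hnn : 0 ≤ PySem.Chars.find l [v] :=
      (PySem.Chars.find_nonneg_iff l [v]).mpr ((singleton_infix_iff_mem v l).mpr hmem)
    obtain ⟨hpre, hfmin⟩ := PySem.Chars.find_spec hnn
    have hFv : l[(PySem.Chars.find l [v]).toNat]? = some v :=
      (singleton_prefix_drop_iff v l _).mp hpre
    have hFt : (PySem.Chars.find l [v]).toNat = t := by
      rcases Nat.lt_trichotomy (PySem.Chars.find l [v]).toNat t with h | h | h
      · exfalso
        have hFlen : (PySem.Chars.find l [v]).toNat < l.length := by
          by_contra hc
          rw [List.getElem?_eq_none (le_of_not_gt hc)] at hFv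
          simp at hFv
        have hv : l[(PySem.Chars.find l [v]).toNat] = v := by
          simpa [List.getElem?_eq_getElem hFlen] using hFv
        exact (by simpa [hv] using hmin _ h)
      · exact h
      · exfalso
        exact hfmin t h ((singleton_prefix_drop_iff v l t).mpr
          (by simp [List.getElem?_eq_getElem ht, htv]))
    have := Int.toNat_of_nonneg hnn
    simp only []
    omega

lemma F3 (v : Char) (cs : List Char) (k : Nat) (hk : k < cs.length) (hne : ¬ (cs[k] == v)) :
    PySem.Chars.findFrom cs [v] (k : Int) none
      = (match (cs.drop (k + 1)).findIdx? (· == v) with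
          | none => -1
          | some t => (k : Int) + 1 + (t : Int)) := by
  rw [PySem.Chars.findFrom_natCast cs [v] k (le_of_lt hk), F2 v (cs.drop k),
      List.drop_eq_getElem_cons hk, List.findIdx?_cons]
  rw [if_neg hne]
  cases hx : (cs.drop (k + 1)).findIdx? (· == v) with
  | none => simp
  | some t =>
    simp
    rw [if_neg (by omega : ¬((t : Int) + 1 = -1))]
    ring

lemma slice_empty (string : String) (i : Int) (hi : 0 ≤ i) :
    PySem.Str.slice string (some i) (some 0) = "" := by
  simp only [PySem.Str.slice, PySem.Chars.slice]
  rw [PySem.List.slice_toNat string.toList hi le_rfl]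
  simp

lemma head_eq (string : String) (j : Nat) (hj : j < string.toList.length) (v : Char)
    (hne : string.toList[j] ≠ v) :
    emitOne string (j : Int)
        (fo v (PySem.List.enumerate (string.toList.drop (j + 1)) ((j : Int) + 1)))
      = [sliceA string (j : Int) v] := by
  rw [F1]
  unfold sliceA
  rw [PySem.Str.findFrom_eq, String.toList_ofList,
      F3 v string.toList j hj (by simp [hne])]
  cases hx : (string.toList.drop (j + 1)).findIdx? (· == v) with
  | none =>
    rw [show (-1 : Int) + 1 = 0 by ring, slice_empty string (j : Int) (by positivity)]
    simp [emitOne]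
  | some t =>
    simp [emitOne]

lemma emit_eq_flatMap_aux (string : String) : ∀ (n j : Nat),
    string.toList.length - j = n → j ≤ string.toList.length →
    emit string (PySem.List.enumerate (string.toList.drop j) (j : Int))
      = (PySem.List.enumerate (string.toList.drop j) (j : Int)).flatMap
          (fun ic => emitA string ic.1 ic.2) := by
  intro n
  induction n with
  | zero =>
    intro j hn hj
    have hd : string.toList.drop j = [] := List.drop_eq_nil_iff.mpr (by omega)
    simp [hd, PySem.List.enumerate_nil, emit]
  | succ n ih =>
    intro j hn hj
    have hjlt : j < string.toList.length := by omega
    rw [List.drop_eq_getElem_cons hjlt, PySem.List.enumerate_cons]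
    have hcast : (j : Int) + 1 = ((j + 1 : Nat) : Int) := by push_cast; ring
    rw [List.flatMap_cons]
    simp only [emit]
    rw [hcast, ih (j + 1) (by omega) (by omega)]
    congr 1
    by_cases h1 : string.toList[j] = '('
    · rw [h1]
      rw [← hcast, head_eq string j hjlt ')' (by rw [h1]; decide)]
      simp [emitA]
    by_cases h2 : string.toList[j] = '['
    · rw [h2]
      rw [← hcast, head_eq string j hjlt ']' (by rw [h2]; decide)]
      simp [emitA]
    by_cases h3 : string.toList[j] = '{'
    · rw [h3]
      rw [← hcast, head_eq string j hjlt '}' (by rw [h3]; decide)]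
      simp [emitA]
    · simp [emitA, beq_iff_eq, h1, h2, h3]

lemma emit_eq_flatMap (string : String) : ∀ (j : Nat), j ≤ string.toList.length →
    emit string (PySem.List.enumerate (string.toList.drop j) (j : Int))
      = (PySem.List.enumerate (string.toList.drop j) (j : Int)).flatMap
          (fun ic => emitA string ic.1 ic.2) := fun j hj =>
  emit_eq_flatMap_aux string (string.toList.length - j) j rfl hj

-- ===== VERDICT (by name: the statement is the Claim_ definition above) =====
theorem balanced_substrings_spec : Claim_equal_balanced_substrings := by
  intro string _
  show balanced_substrings string = balanced_substrings_alt string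
  unfold balanced_substrings balanced_substrings_alt
  rw [List.foldl_reverse, B_fold, A_list]
  have h0 := emit_eq_flatMap string 0 (Nat.zero_le _)
  simp only [List.drop_zero, Int.natCast_zero] at h0
  simp [h0]
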